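-- pv_equiv track=rewrite | github.com/dbespiatykh/tblg | src/tblg/barcoding.py | count_variants
-- ===== SOURCE A (Python) =====
-- def count_variants(call_list, prefix=None):
--     """
--     Count the number of occurrences of each variant in the input list and modify it as follows:
--     - If a variant occurs more than once, keep it as-is.
--     - If a variant occurs only once, concatenate it with a warning message in square brackets.
--     - If a variant starts with the prefix string (if provided), remove it from the list.
--
--     Args:
--         call_list (List[str]): A list of variants.
--         prefix (Optional[str]): A string prefix to remove from the list.
--
--     Returns:
--         List[str]: A modified version of the input list, with variants possibly concatenated with a warning message or removed.
--     """
--     d = {}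
--     for item in call_list:
--         if item:
--             caseless = item.casefold()
--             if caseless in d:
--                 d[caseless][1] += 1
--             else:
--                 d[caseless] = [item, 1]
--
--     call_list = []
--     for item, count in d.values():
--         if not item.startswith(prefix) if prefix else True:
--             item = f"{item}" if count > 1 else f"{item}*"
--         call_list.append(item)
--
--     return call_list
-- ===== SOURCE B (Python) =====
-- def count_variants(call_list, prefix=None):
--     # Count occurrences per casefolded key in one pass, then scan the ORIGINAL
--     # list with a `seen` set, emitting each variant at its first occurrence.
--     counts = {}
--     for item in call_list:
--         if item:
--             key = item.casefold()
--             counts[key] = counts.get(key, 0) + 1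
--
--     result = []
--     seen = set()
--     for item in call_list:
--         if not item:
--             continue
--         key = item.casefold()
--         if key in seen:
--             continue
--         seen.add(key)
--         if prefix and item.startswith(prefix):
--             result.append(item)
--         elif counts[key] > 1:
--             result.append(item)
--         else:
--             result.append(item + "*")
--     return result
-- ===== Notes on version B (the rewrite author's own statement) =====
-- stated objective: idiomatic
-- what changed: Instead of building a dict mapping casefolded key to [first-cased item, count] and iterating that dict's values, B builds a plain count map in one pass and then rescans the original list with a seen-set, emitting each variant at its first occurrence with an if/elif/else chain.
import Mathlib
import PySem

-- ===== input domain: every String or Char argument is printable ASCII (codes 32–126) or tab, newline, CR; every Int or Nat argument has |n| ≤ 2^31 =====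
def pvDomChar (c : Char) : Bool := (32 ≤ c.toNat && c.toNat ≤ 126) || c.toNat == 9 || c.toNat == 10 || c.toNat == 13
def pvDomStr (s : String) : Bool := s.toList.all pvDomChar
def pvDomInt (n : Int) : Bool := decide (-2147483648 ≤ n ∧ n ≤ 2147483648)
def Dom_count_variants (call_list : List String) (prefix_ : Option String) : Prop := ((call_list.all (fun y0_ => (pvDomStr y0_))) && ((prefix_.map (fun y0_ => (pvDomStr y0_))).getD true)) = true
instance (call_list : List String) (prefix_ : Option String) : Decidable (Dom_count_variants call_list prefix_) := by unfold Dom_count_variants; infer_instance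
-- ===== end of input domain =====

-- B replaces A's dict of [first-cased item, count] values (iterated to emit the output) by a plain
-- count map plus a second scan of the ORIGINAL list with a seen-set; same results, no speed claim.
-- In both ports str.casefold() is ported as PySem.Str.lower, exact on the ASCII input domain.

-- ===== PORT A =====
-- d = {}; for item in call_list: if item: (d[caseless][1] += 1  |  d[caseless] = [item, 1]);
-- then for item, count in d.values(): item = (item if count > 1 else item + "*") if
-- (not item.startswith(prefix) if prefix else True) else item; append.
def count_variants (call_list : List String) (prefix_ : Option String) : List String :=
  let d : PySem.Dict String (String × Int) :=
    call_list.foldl (fun d item =>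
      if item ≠ "" then
        if d.contains (PySem.Str.lower item) then
          d.modify (PySem.Str.lower item) ("", 0) (fun v => (v.1, v.2 + 1))
        else d.insert (PySem.Str.lower item) (item, 1)
      else d) PySem.Dict.empty
  d.values.foldl (fun acc v =>
    acc ++ [if (match prefix_ with
                | some p => if p ≠ "" then !(PySem.Str.startswith v.1 p) else true
                | none => true)
            then (if v.2 > 1 then v.1 else v.1 ++ "*") else v.1]) []

-- ===== PORT B =====
-- counts[key] = counts.get(key, 0) + 1 for every truthy item; then scan the original list with a
-- seen-set, emitting at the first occurrence of each key via the if/elif/else chain.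
def count_variants_alt (call_list : List String) (prefix_ : Option String) : List String :=
  let counts : PySem.Dict String Int :=
    call_list.foldl (fun d item =>
      if item ≠ "" then
        d.insert (PySem.Str.lower item) (d.getD (PySem.Str.lower item) 0 + 1)
      else d) PySem.Dict.empty
  (call_list.foldl (fun (st : PySem.Set String × List String) item =>
    if item = "" then st
    else
      let key := PySem.Str.lower item
      if PySem.Set.contains st.1 key then st
      else
        (PySem.Set.add st.1 key,
         if (match prefix_ with
             | some p => !(p == "") && PySem.Str.startswith item p
             | none => false)
         then st.2 ++ [item]
         else if counts.getD key 0 > 1 then st.2 ++ [item]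
         else st.2 ++ [item ++ "*"])) (PySem.Set.empty, [])).2

-- ===== PRECONDITION & SPEC =====
def Spec_count_variants (call_list : List String) (prefix_ : Option String) (out : List String) : Prop := out = count_variants_alt call_list prefix_
instance (call_list : List String) (prefix_ : Option String) (out : List String) : Decidable (Spec_count_variants call_list prefix_ out) := by unfold Spec_count_variants; infer_instance

-- ===== CLAIM (what is proved, stated in full; the proofs are below) =====
def Claim_equal_count_variants : Prop := ∀ (call_list : List String) (prefix_ : Option String), Dom_count_variants call_list prefix_ → Spec_count_variants call_list prefix_ (count_variants call_list prefix_)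

-- ===== LEMMAS AND PROOFS =====

-- keys (casefolded items) of the truthy items, in order, with multiplicity
def pvKeylist (l : List String) : List String := (l.filter (fun s => decide (s ≠ ""))).map PySem.Str.lower

def pvFirsts : List String → (String → Bool) → List String
  | [], _ => []
  | x :: xs, seen =>
    if x ≠ "" ∧ seen (PySem.Str.lower x) = false then
      x :: pvFirsts xs (fun k => k == PySem.Str.lower x || seen k)
    else pvFirsts xs seen

lemma pvFirsts_congr (l : List String) (s t : String → Bool) (h : ∀ k, s k = t k) :
    pvFirsts l s = pvFirsts l t := by
  induction l generalizing s t with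
  | nil => rfl
  | cons x xs ih =>
    simp only [pvFirsts, h]
    split
    · exact congrArg _ (ih _ _ (fun k => rfl))
    · exact ih _ _ h

lemma buildA_keys (l : List String) (d : PySem.Dict String (String × Int)) :
    (l.foldl (fun d item =>
      if item ≠ "" then
        if d.contains (PySem.Str.lower item) then
          d.modify (PySem.Str.lower item) ("", 0) (fun v => (v.1, v.2 + 1))
        else d.insert (PySem.Str.lower item) (item, 1)
      else d) d).keys = PySem.Set.update d.keys (pvKeylist l) := by
  induction l generalizing d with
  | nil => rfl
  | cons x xs ih =>
    simp only [List.foldl_cons]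
    by_cases hx : x = ""
    · rw [if_neg (by simp [hx]), ih]
      simp [pvKeylist, hx]
    · rw [if_pos hx]
      have hkl : pvKeylist (x :: xs) = PySem.Str.lower x :: pvKeylist xs := by
        simp [pvKeylist, hx]
      rw [hkl]
      have hupd : PySem.Set.update d.keys (PySem.Str.lower x :: pvKeylist xs)
          = PySem.Set.update (PySem.Set.add d.keys (PySem.Str.lower x)) (pvKeylist xs) := rfl
      by_cases hc : d.contains (PySem.Str.lower x) = true
      · rw [if_pos hc, ih]
        have h1 : (d.modify (PySem.Str.lower x) ("",0) (fun v => (v.1, v.2+1))).keys = d.keys := by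
          rw [PySem.Dict.keys_modify, PySem.Dict.keys_insert_of_contains _ _ hc]
        have h2 : PySem.Set.add d.keys (PySem.Str.lower x) = d.keys := by
          simp [PySem.Set.add, PySem.Set.contains, (PySem.Dict.contains_iff_mem_keys d (PySem.Str.lower x)).mp hc]
        rw [h1, hupd, h2]
      · rw [if_neg hc, ih]
        have h1 : (d.insert (PySem.Str.lower x) (x,1)).keys = d.keys ++ [PySem.Str.lower x] :=
          PySem.Dict.keys_insert_of_not_contains d _ (by simpa using hc)
        have h2 : PySem.Set.add d.keys (PySem.Str.lower x) = d.keys ++ [PySem.Str.lower x] := by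
          simp only [PySem.Set.add, PySem.Set.contains]
          rw [if_neg]
          intro hmem
          exact hc ((PySem.Dict.contains_iff_mem_keys d (PySem.Str.lower x)).mpr (by simpa using hmem))
        rw [h1, hupd, h2]

lemma buildA_get? (l : List String) (d : PySem.Dict String (String × Int)) (k : String) :
    (l.foldl (fun d item =>
      if item ≠ "" then
        if d.contains (PySem.Str.lower item) then
          d.modify (PySem.Str.lower item) ("", 0) (fun v => (v.1, v.2 + 1))
        else d.insert (PySem.Str.lower item) (item, 1)
      else d) d).get? k =
    match d.get? k with
    | some v => some (v.1, v.2 + ((pvKeylist l).count k : Int))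
    | none => (l.find? (fun y => decide (y ≠ "") && (PySem.Str.lower y == k))).map
                (fun y => (y, ((pvKeylist l).count k : Int))) := by
  induction l generalizing d with
  | nil => cases h : d.get? k <;> simp [h, pvKeylist]
  | cons x xs ih =>
    simp only [List.foldl_cons]
    by_cases hx : x = ""
    · rw [if_neg (by simp [hx]), ih]
      have h1 : pvKeylist (x :: xs) = pvKeylist xs := by simp [pvKeylist, hx]
      have h2 : (x :: xs).find? (fun y => decide (y ≠ "") && (PySem.Str.lower y == k))
          = xs.find? (fun y => decide (y ≠ "") && (PySem.Str.lower y == k)) := by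
        rw [List.find?_cons_of_neg]; simp [hx]
      rw [h1, h2]
    · rw [if_pos hx]
      have hkl : pvKeylist (x :: xs) = PySem.Str.lower x :: pvKeylist xs := by
        simp [pvKeylist, hx]
      by_cases hk : PySem.Str.lower x = k
      · -- x's key is the queried key
        have hcnt : ((pvKeylist (x :: xs)).count k : Int) = ((pvKeylist xs).count k : Int) + 1 := by
          rw [hkl, hk]; simp
        have hfind : (x :: xs).find? (fun y => decide (y ≠ "") && (PySem.Str.lower y == k)) = some x := by
          rw [List.find?_cons_of_pos]; simp [hx, hk]
        by_cases hc : d.contains (PySem.Str.lower x) = true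
        · rw [if_pos hc, ih]
          obtain ⟨v0, hv0⟩ := by
            have := PySem.Dict.contains_eq_isSome_get? d (PySem.Str.lower x)
            rw [hc] at this
            exact Option.isSome_iff_exists.mp this.symm
          have hgd : d.getD (PySem.Str.lower x) ("",0) = v0 := by
            rw [PySem.Dict.getD_eq_get?_getD, hv0]; rfl
          have hget : (d.modify (PySem.Str.lower x) ("",0) (fun v => (v.1, v.2+1))).get? k
              = some (v0.1, v0.2 + 1) := by
            show ((d.insert (PySem.Str.lower x) _).get? k) = _
            rw [PySem.Dict.get?_insert, if_pos hk.symm, hgd]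
          rw [hget, hk] at *
          rw [hv0]
          simp only [hcnt]
          ring_nf
        · rw [if_neg hc, ih]
          have hdk : d.get? k = none := by
            rw [← hk]
            have := PySem.Dict.contains_eq_isSome_get? d (PySem.Str.lower x)
            simp [hc] at this
            exact Option.not_isSome_iff_eq_none.mp (by simp [← this])
          have hget : (d.insert (PySem.Str.lower x) (x,1)).get? k = some (x, 1) := by
            rw [PySem.Dict.get?_insert, if_pos hk.symm]
          rw [hget, hdk, hfind]
          simp only [hcnt, Option.map_some, Int.add_comm]
      · -- different key
        have hcnt : (pvKeylist (x :: xs)).count k = (pvKeylist xs).count k := by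
          rw [hkl]; simp [hk]
        have hfind : (x :: xs).find? (fun y => decide (y ≠ "") && (PySem.Str.lower y == k))
            = xs.find? (fun y => decide (y ≠ "") && (PySem.Str.lower y == k)) := by
          rw [List.find?_cons_of_neg]; simp [hk]
        by_cases hc : d.contains (PySem.Str.lower x) = true
        · rw [if_pos hc, ih]
          have hget : (d.modify (PySem.Str.lower x) ("",0) (fun v => (v.1, v.2+1))).get? k
              = d.get? k := by
            show ((d.insert (PySem.Str.lower x) _).get? k) = _
            rw [PySem.Dict.get?_insert, if_neg (fun h => hk h.symm)]
          rw [hget, hcnt, hfind]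
        · rw [if_neg hc, ih]
          have hget : (d.insert (PySem.Str.lower x) (x,1)).get? k = d.get? k := by
            rw [PySem.Dict.get?_insert, if_neg (fun h => hk h.symm)]
          rw [hget, hcnt, hfind]

lemma update_eq_append_firsts (l : List String) (s : List String) :
    PySem.Set.update s (pvKeylist l) = s ++ (pvFirsts l (fun k => s.contains k)).map PySem.Str.lower := by
  induction l generalizing s with
  | nil => simp [pvKeylist, PySem.Set.update, pvFirsts]
  | cons x xs ih =>
    by_cases hx : x = ""
    · have h1 : pvKeylist (x :: xs) = pvKeylist xs := by simp [pvKeylist, hx]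
      have h2 : pvFirsts (x :: xs) (fun k => s.contains k) = pvFirsts xs (fun k => s.contains k) := by
        simp [pvFirsts, hx]
      rw [h1, h2, ih]
    · have h1 : pvKeylist (x :: xs) = PySem.Str.lower x :: pvKeylist xs := by simp [pvKeylist, hx]
      rw [h1]
      have hupd : PySem.Set.update s (PySem.Str.lower x :: pvKeylist xs)
          = PySem.Set.update (PySem.Set.add s (PySem.Str.lower x)) (pvKeylist xs) := rfl
      rw [hupd]
      by_cases hc : s.contains (PySem.Str.lower x) = true
      · have hmem : PySem.Str.lower x ∈ s := by simpa using hc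
        have ha : PySem.Set.add s (PySem.Str.lower x) = s := by
          simp [PySem.Set.add, PySem.Set.contains, hmem]
        have h2 : pvFirsts (x :: xs) (fun k => s.contains k) = pvFirsts xs (fun k => s.contains k) := by
          rw [pvFirsts, if_neg (fun h => by rw [h.2] at hc; exact Bool.false_ne_true hc)]
        rw [ha, h2, ih]
      · have ha : PySem.Set.add s (PySem.Str.lower x) = s ++ [PySem.Str.lower x] := by
          simp only [PySem.Set.add, PySem.Set.contains]
          rw [if_neg hc]
        have h2 : pvFirsts (x :: xs) (fun k => s.contains k)
            = x :: pvFirsts xs (fun k => k == PySem.Str.lower x || s.contains k) := by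
          rw [pvFirsts, if_pos ⟨hx, by simpa using hc⟩]
        rw [ha, ih, h2]
        have h3 : pvFirsts xs (fun k => (s ++ [PySem.Str.lower x]).contains k)
            = pvFirsts xs (fun k => k == PySem.Str.lower x || s.contains k) := by
          apply pvFirsts_congr
          intro k
          apply Bool.eq_iff_iff.mpr
          simp [or_comm]
        rw [h3]
        simp

lemma mem_pvFirsts (l : List String) (s : String → Bool) (it : String) (h : it ∈ pvFirsts l s) :
    s (PySem.Str.lower it) = false ∧ it ≠ "" ∧
      l.find? (fun y => decide (y ≠ "") && (PySem.Str.lower y == PySem.Str.lower it)) = some it := by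
  induction l generalizing s with
  | nil => simp [pvFirsts] at h
  | cons x xs ih =>
    rw [pvFirsts] at h
    split at h
    · rename_i hcond
      obtain ⟨hx, hseen⟩ := hcond
      rcases List.mem_cons.mp h with rfl | htail
      · refine ⟨hseen, hx, ?_⟩
        rw [List.find?_cons_of_pos]
        simp [hx]
      · obtain ⟨hs', hit, hfind⟩ := ih _ htail
        have hne : (PySem.Str.lower it == PySem.Str.lower x) = false := by
          by_contra hcon
          simp only [Bool.not_eq_false, beq_iff_eq] at hcon
          rw [hcon] at hs'
          simp at hs'
        have hs0 : s (PySem.Str.lower it) = false := by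
          have := hs'
          simp only [hne, Bool.false_or] at this
          exact this
        refine ⟨hs0, hit, ?_⟩
        rw [List.find?_cons_of_neg, hfind]
        simp only [Bool.and_eq_true, decide_eq_true_eq, not_and]
        intro _
        simp only [beq_iff_eq]
        intro hlow
        rw [← hlow] at hne
        simp at hne
    · rename_i hcond
      obtain ⟨hs0, hit, hfind⟩ := ih _ h
      refine ⟨hs0, hit, ?_⟩
      by_cases hx : x = ""
      · rw [List.find?_cons_of_neg, hfind]; simp [hx]
      · have hseen : s (PySem.Str.lower x) = true := by
          rcases Bool.eq_false_or_eq_true (s (PySem.Str.lower x)) with ht | hf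
          · exact ht
          · exact absurd ⟨hx, hf⟩ hcond
        have hne : PySem.Str.lower x ≠ PySem.Str.lower it := by
          intro hcon
          rw [hcon, hs0] at hseen
          exact Bool.false_ne_true hseen
        rw [List.find?_cons_of_neg, hfind]
        simp [hne]

lemma counts_getD (l : List String) (k : String) :
    (l.foldl (fun d item =>
      if item ≠ "" then
        d.insert (PySem.Str.lower item) (d.getD (PySem.Str.lower item) 0 + 1)
      else d) PySem.Dict.empty).getD k 0 = ((pvKeylist l).count k : Int) := by
  have gen : ∀ (l : List String) (d : PySem.Dict String Int),
      (l.foldl (fun d item =>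
        if item ≠ "" then
          let key := PySem.Str.lower item
          d.insert key (d.getD key 0 + 1)
        else d) d).getD k 0 = d.getD k 0 + ((pvKeylist l).count k : Int) := by
    intro l
    induction l with
    | nil => intro d; simp [pvKeylist]
    | cons x xs ih =>
      intro d
      simp only [List.foldl_cons]
      by_cases hx : x = ""
      · rw [if_neg (by simp [hx]), ih]
        simp [pvKeylist, hx]
      · rw [if_pos hx, ih]
        have hkl : pvKeylist (x :: xs) = PySem.Str.lower x :: pvKeylist xs := by
          simp [pvKeylist, hx]
        rw [hkl]
        by_cases hk : PySem.Str.lower x = k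
        · rw [PySem.Dict.getD_insert, if_pos hk.symm, hk]
          simp
          ring
        · rw [PySem.Dict.getD_insert, if_neg (fun h => hk h.symm)]
          simp [hk]
  rw [gen]
  simp

lemma emit_eq (pre : Option String) (it : String) (c : Int) :
    (if (match pre with
         | some p => if p ≠ "" then !(PySem.Str.startswith it p) else true
         | none => true)
     then (if c > 1 then it else it ++ "*") else it)
    = (if (match pre with
           | some p => !(p == "") && PySem.Str.startswith it p
           | none => false)
       then it else if c > 1 then it else it ++ "*") := by
  cases pre with
  | none => simp
  | some p =>
    by_cases hp : p = "" <;>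
      by_cases hs : PySem.Chars.startswith it.toList p.toList = true <;>
        simp [hp, hs]

lemma Bloop_snd (l : List String) (counts : PySem.Dict String Int) (prefix_ : Option String)
    (s : PySem.Set String) (out : List String) :
    (l.foldl (fun (st : PySem.Set String × List String) item =>
      if item = "" then st
      else
        if PySem.Set.contains st.1 (PySem.Str.lower item) then st
        else
          (PySem.Set.add st.1 (PySem.Str.lower item),
           if (match prefix_ with
               | some p => !(p == "") && PySem.Str.startswith item p
               | none => false)
           then st.2 ++ [item]
           else if counts.getD (PySem.Str.lower item) 0 > 1 then st.2 ++ [item]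
           else st.2 ++ [item ++ "*"])) (s, out)).2
    = out ++ (pvFirsts l (fun k => PySem.Set.contains s k)).map (fun it =>
        if (match prefix_ with
            | some p => !(p == "") && PySem.Str.startswith it p
            | none => false)
        then it else if counts.getD (PySem.Str.lower it) 0 > 1 then it else it ++ "*") := by
  induction l generalizing s out with
  | nil => simp [pvFirsts]
  | cons x xs ih =>
    simp only [List.foldl_cons]
    by_cases hx : x = ""
    · rw [if_pos hx, ih]
      rw [pvFirsts, if_neg (fun h => h.1 hx)]
    · rw [if_neg hx]
      by_cases hc : PySem.Set.contains s (PySem.Str.lower x) = true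
      · rw [if_pos hc, ih]
        rw [pvFirsts, if_neg (fun h => by rw [h.2] at hc; exact Bool.false_ne_true hc)]
      · rw [if_neg hc, ih]
        have h2 : pvFirsts (x :: xs) (fun k => PySem.Set.contains s k)
            = x :: pvFirsts xs (fun k => k == PySem.Str.lower x || PySem.Set.contains s k) := by
          rw [pvFirsts, if_pos ⟨hx, by simpa using hc⟩]
        rw [h2]
        have hcongr : pvFirsts xs (fun k => PySem.Set.contains (PySem.Set.add s (PySem.Str.lower x)) k)
            = pvFirsts xs (fun k => k == PySem.Str.lower x || PySem.Set.contains s k) := by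
          apply pvFirsts_congr
          intro k
          have ha : PySem.Set.add s (PySem.Str.lower x) = s ++ [PySem.Str.lower x] := by
            simp only [PySem.Set.add]
            rw [if_neg hc]
          rw [ha]
          apply Bool.eq_iff_iff.mpr
          simp [PySem.Set.contains, or_comm]
        rw [hcongr]
        simp only [List.map_cons]
        split_ifs <;> (first | rfl | simp)

-- ===== VERDICT (by name: the statement is the Claim_ definition above) =====
theorem count_variants_spec : Claim_equal_count_variants := by
  intro call_list prefix_ hdom
  clear hdom
  unfold Spec_count_variants

  simp only [count_variants, count_variants_alt]
  set D : PySem.Dict String (String × Int) := call_list.foldl (fun d item =>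
      if item ≠ "" then
        if d.contains (PySem.Str.lower item) then
          d.modify (PySem.Str.lower item) ("", 0) (fun v => (v.1, v.2 + 1))
        else d.insert (PySem.Str.lower item) (item, 1)
      else d) PySem.Dict.empty with hD
  -- keys of D
  have hkeys : D.keys = (pvFirsts call_list (fun _ => false)).map PySem.Str.lower := by
    rw [hD, buildA_keys, PySem.Dict.keys_empty, update_eq_append_firsts, List.nil_append]
    exact congrArg (List.map PySem.Str.lower) (pvFirsts_congr _ _ _ (fun k => rfl))
  have hnd : D.keys.Nodup := by
    rw [hD, buildA_keys, PySem.Dict.keys_empty]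
    have hofl : PySem.Set.update ([] : PySem.Set String) (pvKeylist call_list)
        = PySem.Set.ofList (pvKeylist call_list) := by
      rw [PySem.Set.ofList_eq_foldl]; rfl
    rw [hofl]
    exact PySem.Set.nodup_ofList _
  have hvals : D.values = (pvFirsts call_list (fun _ => false)).map
      (fun it => (it, ((pvKeylist call_list).count (PySem.Str.lower it) : Int))) := by
    rw [PySem.Dict.values_eq_map_keys D hnd ("", 0), hkeys, List.map_map]
    apply List.map_congr_left
    intro it hmem
    obtain ⟨_, hit, hfind⟩ := mem_pvFirsts _ _ _ hmem
    have hget : D.get? (PySem.Str.lower it) = some (it, ((pvKeylist call_list).count (PySem.Str.lower it) : Int)) := by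
      rw [hD, buildA_get?]
      simp only [PySem.Dict.get?_empty]
      rw [hfind]
      rfl
    simp only [Function.comp_apply]
    rw [PySem.Dict.getD_eq_get?_getD, hget]
    rfl
  -- A's output loop
  rw [hvals, PySem.List.foldl_append_singleton_eq_map
    (f := fun (v : String × Int) =>
      if ((match prefix_ with
           | some p => if p ≠ "" then !(PySem.Str.startswith v.1 p) else true
           | none => true) : Bool)
      then (if v.2 > 1 then v.1 else v.1 ++ "*") else v.1)]
  rw [List.nil_append, List.map_map]
  rw [Bloop_snd, List.nil_append]
  have hfc : pvFirsts call_list (fun k => PySem.Set.contains PySem.Set.empty k)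
      = pvFirsts call_list (fun _ => false) := by
    apply pvFirsts_congr
    intro k
    simp [PySem.Set.contains, PySem.Set.empty]
  rw [hfc]
  apply List.map_congr_left
  intro it hmem
  rw [counts_getD]
  exact emit_eq prefix_ it _
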